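-- pv_equiv track=rewrite | github.com/EgorVardanyan/homeworks_python | 02.06/1.py | get_neighbor_position
-- ===== SOURCE A (Python) =====
-- def get_neighbor_position(matrix, i, j):
--     start_i = 0 if i -1  < 0  else i - 1
--     end_i = len(matrix) if i + 2 >= len(matrix) else i + 2
--     start_j = 0 if j - 1 < 0 else j - 1
--     end_j = len(matrix) if j + 2 >= len(matrix) else j + 2
--     return [(i, j)
--             for i in range(start_i, end_i)
--             for j in range(start_j, end_j) if matrix[i][j] != 'M']
-- ===== SOURCE B (Python) =====
-- def get_neighbor_position(matrix, i, j):
--     n = len(matrix)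
--     return [(r, c) for r in range(n) for c in range(n)
--             if abs(r - i) <= 1 and abs(c - j) <= 1 and matrix[r][c] != 'M']
-- ===== Notes on version B (the rewrite author's own statement) =====
-- stated objective: alternative
-- what changed: Instead of constructing the clamped 3x3 sub-ranges and iterating only them, B scans the entire n x n grid once and filters cells by Chebyshev distance <= 1 from (i,j) (with short-circuit indexing only inside the window), trading the O(1) clamped-window construction for an O(n^2) filter of the full grid.
import Mathlib
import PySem

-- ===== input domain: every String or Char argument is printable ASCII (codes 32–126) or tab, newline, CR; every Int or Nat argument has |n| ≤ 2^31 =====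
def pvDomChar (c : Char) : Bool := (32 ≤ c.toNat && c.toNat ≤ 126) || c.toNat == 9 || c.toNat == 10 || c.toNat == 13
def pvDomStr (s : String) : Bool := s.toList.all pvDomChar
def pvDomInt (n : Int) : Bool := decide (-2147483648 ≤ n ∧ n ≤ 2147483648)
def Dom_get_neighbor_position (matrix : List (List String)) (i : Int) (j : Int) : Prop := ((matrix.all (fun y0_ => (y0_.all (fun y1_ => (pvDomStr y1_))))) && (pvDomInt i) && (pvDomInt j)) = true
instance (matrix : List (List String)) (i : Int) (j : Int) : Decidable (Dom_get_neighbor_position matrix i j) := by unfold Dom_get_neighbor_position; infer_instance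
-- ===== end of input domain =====

-- B replaces A's clamped-window construction by a single filter over the WHOLE n×n grid,
-- keeping cells at Chebyshev distance ≤ 1 from (i,j) (objective: alternative).

-- matrix[r][c] as both Pythons read it (indices are in range on every admitted input)
def pvCell (matrix : List (List String)) (r c : Int) : String :=
  PySem.List.pyGetD (PySem.List.pyGetD matrix r []) c ""

-- ===== PORT A =====
def get_neighbor_position (matrix : List (List String)) (i : Int) (j : Int) : List (Int × Int) :=
  let n : Int := matrix.length
  let start_i : Int := if i - 1 < 0 then 0 else i - 1
  let end_i : Int := if i + 2 ≥ n then n else i + 2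
  let start_j : Int := if j - 1 < 0 then 0 else j - 1
  let end_j : Int := if j + 2 ≥ n then n else j + 2
  (PySem.List.pyRange start_i end_i 1).flatMap (fun r =>
    (PySem.List.pyRange start_j end_j 1).filterMap (fun c =>
      if pvCell matrix r c ≠ "M" then some (r, c) else none))

-- ===== PORT B =====
def get_neighbor_position_alt (matrix : List (List String)) (i : Int) (j : Int) : List (Int × Int) :=
  let n : Int := matrix.length
  (PySem.List.pyRange 0 n 1).flatMap (fun r =>
    (PySem.List.pyRange 0 n 1).filterMap (fun c =>
      if (r - i).natAbs ≤ 1 ∧ (c - j).natAbs ≤ 1 ∧ pvCell matrix r c ≠ "M"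
      then some (r, c) else none))

-- ===== PRECONDITION & SPEC =====
-- Pre_ excludes exactly the inputs on which A raises IndexError: a row inside the 3×3
-- window shorter than the column window's upper bound (A indexes columns up to
-- min(j+2, len(matrix)), assuming a square matrix).
def Pre_get_neighbor_position (matrix : List (List String)) (i : Int) (j : Int) : Prop :=
  max (j - 1) 0 < min (j + 2) (matrix.length : Int) →
    ∀ k : Nat, k < matrix.length → max (i - 1) 0 ≤ (k : Int) → (k : Int) < min (i + 2) (matrix.length : Int) →
      min (j + 2) (matrix.length : Int) ≤ ((matrix.getD k []).length : Int)
instance (matrix : List (List String)) (i : Int) (j : Int) : Decidable (Pre_get_neighbor_position matrix i j) := by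
  unfold Pre_get_neighbor_position; infer_instance

def pvWitness_get_neighbor_position : List (List String) × Int × Int :=
  ([[".", "M", "."], [".", ".", "M"], ["x", ".", "."]], 1, 1)

def Spec_get_neighbor_position (matrix : List (List String)) (i : Int) (j : Int) (out : List (Int × Int)) : Prop := out = get_neighbor_position_alt matrix i j
instance (matrix : List (List String)) (i : Int) (j : Int) (out : List (Int × Int)) : Decidable (Spec_get_neighbor_position matrix i j out) := by unfold Spec_get_neighbor_position; infer_instance

-- ===== CLAIM (what is proved, stated in full; the proofs are below) =====
def Claim_equal_get_neighbor_position : Prop := ∀ (matrix : List (List String)) (i : Int) (j : Int), Dom_get_neighbor_position matrix i j → Pre_get_neighbor_position matrix i j → Spec_get_neighbor_position matrix i j (get_neighbor_position matrix i j)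

-- ===== LEMMAS AND PROOFS =====

lemma pv_ite_max (i : Int) : (if i - 1 < 0 then 0 else i - 1) = max (i - 1) 0 := by
  split <;> omega

lemma pv_ite_min (x n : Int) : (if x ≥ n then n else x) = min x n := by
  split <;> omega

-- a flatMap over the full range [0, m) clamps to the 3-wide window around t
-- when the body vanishes outside the window
lemma pv_clamp_flatMap (t : Int) (m : Nat) (f : Int → List (Int × Int))
    (hf : ∀ r : Int, ¬ (t - 1 ≤ r ∧ r ≤ t + 1) → f r = []) :
    (PySem.List.pyRange 0 (m : Int) 1).flatMap f
      = (PySem.List.pyRange (max (t - 1) 0) (min (t + 2) (m : Int)) 1).flatMap f := by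
  induction m with
  | zero =>
    rw [PySem.List.pyRange_one_eq_nil (by simp), PySem.List.pyRange_one_eq_nil (by simp)]
  | succ m ih =>
    have h1 : ((m + 1 : Nat) : Int) = (m : Int) + 1 := by push_cast; ring
    rw [h1, PySem.List.pyRange_one_succ_right (by positivity), List.flatMap_append, ih]
    by_cases hw : t - 1 ≤ (m : Int) ∧ (m : Int) ≤ t + 1
    · have hmin2 : min (t + 2) (m : Int) = (m : Int) := by omega
      have hmin1 : min (t + 2) ((m : Int) + 1) = (m : Int) + 1 := by omega
      rw [hmin2, hmin1, PySem.List.pyRange_one_succ_right (by omega), List.flatMap_append]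
    · simp only [List.flatMap_cons, List.flatMap_nil, List.append_nil, hf _ hw]
      rcases (by omega : (m : Int) < t - 1 ∨ t + 1 < (m : Int)) with h | h
      · rw [PySem.List.pyRange_one_eq_nil (by omega), PySem.List.pyRange_one_eq_nil (by omega)]
      · have : min (t + 2) ((m : Int) + 1) = min (t + 2) (m : Int) := by omega
        rw [this]

-- the same clamping for a filterMap whose body vanishes outside the window
lemma pv_clamp_filterMap (t : Int) (m : Nat) (g : Int → Option (Int × Int))
    (hg : ∀ c : Int, ¬ (t - 1 ≤ c ∧ c ≤ t + 1) → g c = none) :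
    (PySem.List.pyRange 0 (m : Int) 1).filterMap g
      = (PySem.List.pyRange (max (t - 1) 0) (min (t + 2) (m : Int)) 1).filterMap g := by
  induction m with
  | zero =>
    rw [PySem.List.pyRange_one_eq_nil (by simp), PySem.List.pyRange_one_eq_nil (by simp)]
  | succ m ih =>
    have h1 : ((m + 1 : Nat) : Int) = (m : Int) + 1 := by push_cast; ring
    rw [h1, PySem.List.pyRange_one_succ_right (by positivity), List.filterMap_append, ih]
    by_cases hw : t - 1 ≤ (m : Int) ∧ (m : Int) ≤ t + 1
    · have hmin2 : min (t + 2) (m : Int) = (m : Int) := by omega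
      have hmin1 : min (t + 2) ((m : Int) + 1) = (m : Int) + 1 := by omega
      rw [hmin2, hmin1, PySem.List.pyRange_one_succ_right (by omega), List.filterMap_append]
    · simp only [List.filterMap_cons, List.filterMap_nil, hg _ hw, List.append_nil]
      rcases (by omega : (m : Int) < t - 1 ∨ t + 1 < (m : Int)) with h | h
      · rw [PySem.List.pyRange_one_eq_nil (by omega), PySem.List.pyRange_one_eq_nil (by omega)]
      · have : min (t + 2) ((m : Int) + 1) = min (t + 2) (m : Int) := by omega
        rw [this]

-- ===== VERDICT (by name: the statement is the Claim_ definition above) =====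
theorem get_neighbor_position_spec : Claim_equal_get_neighbor_position := by
  intro matrix i j _ _
  unfold Spec_get_neighbor_position get_neighbor_position get_neighbor_position_alt
  simp only [pv_ite_max, pv_ite_min]
  rw [pv_clamp_flatMap i matrix.length _ (fun r hr => by
        apply List.filterMap_eq_nil_iff.mpr
        intro c _
        rw [if_neg]
        intro hx
        exact hr (by omega))]
  rw [List.flatMap_def, List.flatMap_def]
  refine congrArg List.flatten (List.map_congr_left fun r hr => ?_)
  have hrw : i - 1 ≤ r ∧ r ≤ i + 1 := by
    have := (PySem.List.mem_pyRange_one).mp hr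
    constructor <;> omega
  rw [pv_clamp_filterMap j matrix.length _ (fun c hc => by
        rw [if_neg]
        intro hx
        exact hc (by omega))]
  refine List.filterMap_congr fun c hc => ?_
  have hcw : j - 1 ≤ c ∧ c ≤ j + 1 := by
    have := (PySem.List.mem_pyRange_one).mp hc
    constructor <;> omega
  by_cases hm : pvCell matrix r c ≠ "M"
  · rw [if_pos hm, if_pos ⟨by omega, by omega, hm⟩]
  · rw [if_neg hm, if_neg (fun hx => hm hx.2.2)]
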